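-- pv_equiv track=rewrite | github.com/nicoding/Software-contest | source/CalEffectiveProb_spurs_oneonone.py | calMoney
-- ===== SOURCE A (Python) =====
-- def calMoney(totalNum,money,jetton):
--     totalMoney = []
--     if len(money) <= 1:
--         return 0,0
--     else:
--         for i in range(0,len(money)-1):
--             totalMoney.append(money[i] + jetton[i])
--         moneyMin = min(totalMoney)
--         moneyMax = max(totalMoney)
--     return moneyMin,moneyMax
-- ===== SOURCE B (Python) =====
-- def calMoney(totalNum, money, jetton):
--     # Sort the pairwise sums once and read the extrema off the ends.
--     if len(money) <= 1:
--         return 0, 0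
--     s = sorted(m + j for m, j in zip(money[:-1], jetton))
--     return s[0], s[-1]
-- ===== Notes on version B (the rewrite author's own statement) =====
-- stated objective: alternative
-- what changed: B sorts the pairwise sums of money[:-1] zipped with jetton and returns the first and last elements of the sorted list, instead of A's index loop appending to a list and scanning it with min() and max().
import Mathlib
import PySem

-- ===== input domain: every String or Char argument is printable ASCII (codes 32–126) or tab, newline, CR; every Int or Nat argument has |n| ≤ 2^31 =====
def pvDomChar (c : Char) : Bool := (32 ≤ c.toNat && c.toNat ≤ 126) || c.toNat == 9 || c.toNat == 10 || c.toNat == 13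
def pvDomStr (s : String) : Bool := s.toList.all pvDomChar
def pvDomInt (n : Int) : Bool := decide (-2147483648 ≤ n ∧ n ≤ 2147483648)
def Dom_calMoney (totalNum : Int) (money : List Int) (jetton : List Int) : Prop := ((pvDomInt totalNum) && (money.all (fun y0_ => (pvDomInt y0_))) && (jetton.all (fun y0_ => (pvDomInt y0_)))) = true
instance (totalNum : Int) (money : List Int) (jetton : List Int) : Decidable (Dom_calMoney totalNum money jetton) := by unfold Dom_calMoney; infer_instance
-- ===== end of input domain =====

-- B sorts the pairwise sums once and reads the extrema off the sorted list's ends,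
-- replacing A's index loop appending to a list scanned by min() and max() (objective: alternative).

-- ===== PORT A =====
def calMoney (totalNum : Int) (money : List Int) (jetton : List Int) : Int × Int :=
  if money.length ≤ 1 then (0, 0)
  else
    -- for i in range(0, len(money)-1): totalMoney.append(money[i] + jetton[i])
    let totalMoney := (PySem.List.pyRange 0 ((money.length : Int) - 1) 1).foldl
      (fun acc i => acc ++ [PySem.List.pyGetD money i 0 + PySem.List.pyGetD jetton i 0]) []
    -- min/max raise on an empty list; inside Pre_ the list is nonempty, .getD 0 is never taken
    ((PySem.List.min? totalMoney (fun x => x)).getD 0,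
     (PySem.List.max? totalMoney (fun x => x)).getD 0)

-- ===== PORT B =====
def calMoney_alt (totalNum : Int) (money : List Int) (jetton : List Int) : Int × Int :=
  if money.length ≤ 1 then (0, 0)
  else
    -- s = sorted(m + j for m, j in zip(money[:-1], jetton)); return s[0], s[-1]
    let s := PySem.List.sorted
      (((PySem.List.slice money none (some (-1))).zip jetton).map (fun p => p.1 + p.2))
      (fun x => x) false
    -- s[0] / s[-1] raise IndexError on an empty s; inside Pre_ s is nonempty, default never taken
    (PySem.List.pyGetD s 0 0, PySem.List.pyGetD s (-1) 0)

-- ===== PRECONDITION & SPEC =====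
-- A raises IndexError when jetton is shorter than len(money)-1 (jetton[i] out of range); exactly those inputs are excluded.
def Pre_calMoney (totalNum : Int) (money : List Int) (jetton : List Int) : Prop :=
  money.length ≤ 1 ∨ money.length - 1 ≤ jetton.length
instance (totalNum : Int) (money : List Int) (jetton : List Int) : Decidable (Pre_calMoney totalNum money jetton) := by unfold Pre_calMoney; infer_instance
def pvWitness_calMoney : Int × List Int × List Int := (0, [1, 2], [3])

def Spec_calMoney (totalNum : Int) (money : List Int) (jetton : List Int) (out : Int × Int) : Prop := out = calMoney_alt totalNum money jetton
instance (totalNum : Int) (money : List Int) (jetton : List Int) (out : Int × Int) : Decidable (Spec_calMoney totalNum money jetton out) := by unfold Spec_calMoney; infer_instance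

-- ===== CLAIM (what is proved, stated in full; the proofs are below) =====
def Claim_equal_calMoney : Prop := ∀ (totalNum : Int) (money : List Int) (jetton : List Int), Dom_calMoney totalNum money jetton → Pre_calMoney totalNum money jetton → Spec_calMoney totalNum money jetton (calMoney totalNum money jetton)

-- ===== LEMMAS AND PROOFS =====

-- A's appended sum list is the map of pairwise sums over money[:-1] zipped with jetton.
lemma calMoney_sums_eq (money jetton : List Int)
    (h : money.length - 1 ≤ jetton.length) :
    (PySem.List.pyRange 0 ((money.length : Int) - 1) 1).map
      (fun i => PySem.List.pyGetD money i 0 + PySem.List.pyGetD jetton i 0)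
    = (money.dropLast.zip jetton).map (fun p => p.1 + p.2) := by
  apply List.ext_getElem
  · simp [PySem.List.length_pyRange_one, List.length_zip, List.length_dropLast]
    omega
  · intro k h1 h2
    have hk : k < money.length - 1 := by
      simp [PySem.List.length_pyRange_one] at h1; omega
    have hkm : k < money.length := by omega
    have hkj : k < jetton.length := by omega
    rw [List.getElem_map, PySem.List.getElem_pyRange_one, List.getElem_map, List.getElem_zip]
    simp only [zero_add]
    rw [PySem.List.pyGetD_natCast, PySem.List.pyGetD_natCast]
    simp [List.getD_eq_getElem?_getD, hkm, hkj, List.getElem_dropLast]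

-- The head of the sorted list is the (unique) minimum value of a nonempty list.
lemma sorted_head_eq_min (L : List Int) (hL : L ≠ []) :
    PySem.List.pyGetD (PySem.List.sorted L (fun x => x) false) 0 0
      = (PySem.List.min? L (fun x => x)).getD 0 := by
  obtain ⟨m, hm⟩ : ∃ m, PySem.List.min? L (fun x => x) = some m := by
    cases h : PySem.List.min? L (fun x => x) with
    | none => exact absurd ((PySem.List.min?_eq_none_iff L _).mp h) hL
    | some m => exact ⟨m, rfl⟩
    
  obtain ⟨h0, t, hs⟩ : ∃ h0 t, PySem.List.sorted L (fun x => x) false = h0 :: t := by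
    cases hsrt : PySem.List.sorted L (fun x => x) false with
    | nil => exact absurd ((PySem.List.sorted_eq_nil_iff L _ _).mp hsrt) hL
    | cons a b => exact ⟨a, b, rfl⟩
  rw [hs, hm, PySem.List.pyGetD_zero_cons, Option.getD_some]
  have hmem : h0 ∈ L := by
    have := PySem.List.mem_sorted L (fun x => x) false h0
    rw [hs] at this; exact this.mp (by simp)
  have h1 : h0 ≤ m := PySem.List.key_head_sorted_le L (fun x => x) hs m (PySem.List.min?_mem hm)
  have h2 : m ≤ h0 := PySem.List.min?_isMin hm h0 hmem
  omega

-- The last element of the sorted list is the maximum value of a nonempty list.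
lemma sorted_last_eq_max (L : List Int) (hL : L ≠ []) :
    PySem.List.pyGetD (PySem.List.sorted L (fun x => x) false) (-1) 0
      = (PySem.List.max? L (fun x => x)).getD 0 := by
  obtain ⟨m, hm⟩ : ∃ m, PySem.List.max? L (fun x => x) = some m := by
    cases h : PySem.List.max? L (fun x => x) with
    | none => exact absurd ((PySem.List.max?_eq_none_iff L _).mp h) hL
    | some m => exact ⟨m, rfl⟩
  set s := PySem.List.sorted L (fun x => x) false with hs
  have hsne : s ≠ [] := by
    intro h; exact hL ((PySem.List.sorted_eq_nil_iff L _ _).mp (hs ▸ h))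
  have hslen : 0 < s.length := List.length_pos_iff.mpr hsne
  rw [PySem.List.pyGetD_neg_one s 0 hsne, hm, Option.getD_some]
  have hlast_mem : s.getLast hsne ∈ L := by
    rw [← PySem.List.mem_sorted L (fun x => x) false]
    exact List.getLast_mem hsne
  have h1 : s.getLast hsne ≤ m := PySem.List.max?_isMax hm _ hlast_mem
  have h2 : m ≤ s.getLast hsne := by
    have hmmem : m ∈ s := (PySem.List.mem_sorted L (fun x => x) false m).mpr (PySem.List.max?_mem hm)
    obtain ⟨p, hp, hpe⟩ := List.getElem_of_mem hmmem
    have := PySem.List.key_sorted_getElem_mono L (fun x => x)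
      (p := p) (q := s.length - 1) (by omega) (by rw [← hs]; omega)
    rw [List.getLast_eq_getElem]
    simpa [← hs, hpe] using this
  omega

-- ===== VERDICT (by name: the statement is the Claim_ definition above) =====
theorem calMoney_spec : Claim_equal_calMoney := by
  intro totalNum money jetton _ hpre
  unfold Spec_calMoney calMoney calMoney_alt
  by_cases hlen : money.length ≤ 1
  · simp [hlen]
  · simp only [hlen, if_false]
    have hj : money.length - 1 ≤ jetton.length := by
      rcases hpre with h | h
      · omega
      · exact h
    rw [PySem.List.foldl_append_singleton_eq_map, calMoney_sums_eq money jetton hj,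
      PySem.List.slice_to_neg_one]
    set L := (money.dropLast.zip jetton).map (fun p => p.1 + p.2) with hLdef
    have hLne : L ≠ [] := by
      have : L.length = money.length - 1 := by
        simp [hLdef, List.length_zip, List.length_dropLast]; omega
      intro h; rw [h] at this; simp at this; omega
    simp only [List.nil_append]
    rw [sorted_head_eq_min L hLne, sorted_last_eq_max L hLne]
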